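-- pv_equiv track=rewrite | github.com/CEA-LIST/textmine-2025 | utils/utils_atlop_lace.py | get_sent_pos
-- ===== SOURCE A (Python) =====
-- def get_sent_pos(sample):
--     ''' Return the start and end positions of each sentence in the sample. '''
--
--     sent_pos = []
--     sent_start = 0
--
--     for sent in sample['sents']:
--         sent_length = len(sent)
--         sent_end = sent_start + sent_length
--         sent_pos.append((sent_start, sent_end))
--         sent_start = sent_end
--
--     return sent_pos
-- ===== SOURCE B (Python) =====
-- from itertools import accumulate
--
-- def get_sent_pos(sample):
--     ''' Return the start and end positions of each sentence in the sample. '''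
--     bounds = list(accumulate((len(sent) for sent in sample['sents']), initial=0))
--     return list(zip(bounds, bounds[1:]))
-- ===== Notes on version B (the rewrite author's own statement) =====
-- stated objective: idiomatic
-- what changed: B first builds the cumulative boundary table with itertools.accumulate(initial=0) and then pairs adjacent boundaries with zip, instead of threading a running sent_start and appending inside one loop.
import Mathlib
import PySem

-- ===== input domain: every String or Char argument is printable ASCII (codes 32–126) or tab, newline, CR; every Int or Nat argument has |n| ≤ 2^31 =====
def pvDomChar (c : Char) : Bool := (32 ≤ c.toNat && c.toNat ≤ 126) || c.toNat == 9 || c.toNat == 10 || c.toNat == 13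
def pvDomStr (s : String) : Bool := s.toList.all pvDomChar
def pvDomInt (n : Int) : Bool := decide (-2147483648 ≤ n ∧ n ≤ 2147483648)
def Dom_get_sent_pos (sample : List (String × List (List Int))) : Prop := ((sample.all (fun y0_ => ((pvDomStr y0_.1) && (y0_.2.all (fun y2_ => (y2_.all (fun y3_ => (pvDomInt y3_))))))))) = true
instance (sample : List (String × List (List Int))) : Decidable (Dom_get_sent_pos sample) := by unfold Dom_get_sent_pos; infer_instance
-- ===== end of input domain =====

-- B replaces A's single running-start loop by a two-phase idiomatic form: a cumulative
-- boundary table (accumulate with initial=0) followed by pairing adjacent boundaries with zip.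


-- ===== PORT A =====
-- sample is a Python dict; sample['sents'] = first-match lookup (KeyError if absent, excluded by Pre_).
def get_sent_pos (sample : List (String × List (List Int))) : List (Int × Int) :=
  match (sample.find? (fun p => p.1 == "sents")).map Prod.snd with
  | none => []  -- unreachable under Pre_get_sent_pos (Python raises KeyError)
  | some sents =>
    (sents.foldl
      (fun (st : List (Int × Int) × Int) sent =>
        let sent_length : Int := sent.length
        let sent_end := st.2 + sent_length
        (st.1 ++ [(st.2, sent_end)], sent_end))
      ([], 0)).1

-- ===== PORT B =====
-- bounds = accumulate(lengths, initial=0) = List.scanl (+) 0; result = zip(bounds, bounds[1:]).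
def get_sent_pos_alt (sample : List (String × List (List Int))) : List (Int × Int) :=
  match (sample.find? (fun p => p.1 == "sents")).map Prod.snd with
  | none => []  -- unreachable under Pre_get_sent_pos (Python raises KeyError)
  | some sents =>
    let bounds := List.scanl (fun (a : Int) (l : Int) => a + l) 0
      (sents.map (fun sent => (sent.length : Int)))
    bounds.zip bounds.tail

-- ===== PRECONDITION & SPEC =====
-- Pre_ excludes inputs where the dict has no key "sents": Python A raises KeyError there.
def Pre_get_sent_pos (sample : List (String × List (List Int))) : Prop :=
  (sample.find? (fun p => p.1 == "sents")).isSome = true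
instance (sample : List (String × List (List Int))) : Decidable (Pre_get_sent_pos sample) := by unfold Pre_get_sent_pos; infer_instance
def pvWitness_get_sent_pos : (List (String × List (List Int))) := [("sents", [[1, 2], [3]])]

def Spec_get_sent_pos (sample : List (String × List (List Int))) (out : List (Int × Int)) : Prop := out = get_sent_pos_alt sample
instance (sample : List (String × List (List Int))) (out : List (Int × Int)) : Decidable (Spec_get_sent_pos sample out) := by unfold Spec_get_sent_pos; infer_instance

-- ===== CLAIM (what is proved, stated in full; the proofs are below) =====
def Claim_equal_get_sent_pos : Prop := ∀ (sample : List (String × List (List Int))), Dom_get_sent_pos sample → Pre_get_sent_pos sample → Spec_get_sent_pos sample (get_sent_pos sample)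

-- ===== LEMMAS AND PROOFS =====

-- A's loop from running start `st` with accumulator `acc` produces exactly the zip of the
-- boundary table scanned from `st`.
theorem pv_loop_eq_scan (sents : List (List Int)) :
    ∀ (acc : List (Int × Int)) (st : Int),
      (sents.foldl
        (fun (s : List (Int × Int) × Int) sent =>
          let sent_length : Int := sent.length
          let sent_end := s.2 + sent_length
          (s.1 ++ [(s.2, sent_end)], sent_end))
        (acc, st)).1
      = acc ++ (let bounds := List.scanl (fun (a : Int) (l : Int) => a + l) st
                  (sents.map (fun sent => (sent.length : Int)))
                bounds.zip bounds.tail) := by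
  induction sents with
  | nil => intro acc st; simp
  | cons x xs ih =>
      intro acc st
      simp only [List.foldl_cons, List.map_cons, List.scanl_cons]
      rw [ih]
      cases xs with
      | nil => simp
      | cons y ys => simp [List.scanl_cons, List.zip_cons_cons]

theorem get_sent_pos_eq (sample : List (String × List (List Int))) :
    get_sent_pos sample = get_sent_pos_alt sample := by
  unfold get_sent_pos get_sent_pos_alt
  cases h : (sample.find? (fun p => p.1 == "sents")).map Prod.snd with
  | none => rfl
  | some sents => simpa using pv_loop_eq_scan sents [] 0

-- ===== VERDICT (by name: the statement is the Claim_ definition above) =====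
theorem get_sent_pos_spec : Claim_equal_get_sent_pos := by
  intro sample _ _
  exact get_sent_pos_eq sample
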